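-- pv_equiv track=rewrite | github.com/fireflyc/leetcode-100 | leetcode/stella/Container.py | maximum_nesting_depth_of_two_valid_parentheses_string
-- ===== SOURCE A (Python) =====
-- from typing import List
--
-- def maximum_nesting_depth_of_two_valid_parentheses_string(seq: str) -> List[int]:
--     left_stack, queue = [], []
--     for s in seq:
--         if s == "(":
--             if left_stack and left_stack[-1] == "A":
--                 left_stack.append("B")
--                 queue.append(1)
--             else:
--                 left_stack.append("A")
--                 queue.append(0)
--         elif s == ")":
--             if left_stack.pop() == "A":
--                 queue.append(0)
--             else:
--                 queue.append(1)
--     return queue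
-- ===== SOURCE B (Python) =====
-- from typing import List
--
-- def maximum_nesting_depth_of_two_valid_parentheses_string(seq: str) -> List[int]:
--     # Closed form: the bit emitted for the j-th bracket (0-based, counting only
--     # '(' and ')') is (j + (bracket is ')')) % 2 — no stack, no depth tracking.
--     brackets = [c for c in seq if c in "()"]
--     return [(j + (c == ")")) % 2 for j, c in enumerate(brackets)]
-- ===== Notes on version B (the rewrite author's own statement) =====
-- stated objective: simpler
-- what changed: Replaces A's simulation with a stack of alternating 'A'/'B' labels by a stackless closed form: the emitted bit for the j-th bracket among the brackets is (j + (bracket==')')) % 2, computed by a filter plus one enumerate comprehension; Pre_ excludes the inputs where A's pop raises IndexError.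
import Mathlib
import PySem

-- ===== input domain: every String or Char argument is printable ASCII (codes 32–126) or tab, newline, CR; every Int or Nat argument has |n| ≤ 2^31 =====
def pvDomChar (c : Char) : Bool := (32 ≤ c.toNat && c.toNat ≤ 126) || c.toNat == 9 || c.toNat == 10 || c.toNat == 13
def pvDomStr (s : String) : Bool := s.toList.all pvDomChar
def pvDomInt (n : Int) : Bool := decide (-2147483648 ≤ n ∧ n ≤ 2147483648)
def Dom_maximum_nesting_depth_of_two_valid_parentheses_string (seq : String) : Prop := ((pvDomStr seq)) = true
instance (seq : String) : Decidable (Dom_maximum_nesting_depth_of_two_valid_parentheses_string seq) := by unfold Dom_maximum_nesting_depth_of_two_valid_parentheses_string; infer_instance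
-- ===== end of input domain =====

-- B replaces A's stack of alternating "A"/"B" labels by a stackless closed form:
-- the bit for the j-th bracket among the brackets is (j + (bracket = ')')) % 2 (objective: simpler).

-- ===== PORT A =====
-- loop over the characters; left_stack has its top at the HEAD (Python's append/[-1]/pop on
-- the list end become cons/head/tail here); queue is accumulated in order with ++ [x]
def pvGoA : List Char → List String → List Int → List Int
  | [], _, queue => queue
  | c :: rest, st, queue =>
    if c = '(' then
      match st with
      | "A" :: _ => pvGoA rest ("B" :: st) (queue ++ [1])
      | _        => pvGoA rest ("A" :: st) (queue ++ [0])
    else if c = ')' then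
      match st with
      | []       => queue          -- Python raises IndexError here (outside Pre_)
      | t :: st' => if t = "A" then pvGoA rest st' (queue ++ [0]) else pvGoA rest st' (queue ++ [1])
    else pvGoA rest st queue

def maximum_nesting_depth_of_two_valid_parentheses_string (seq : String) : List Int :=
  pvGoA seq.toList [] []

-- ===== PORT B =====
def pvIsBracket (c : Char) : Bool := c = '(' || c = ')'

def maximum_nesting_depth_of_two_valid_parentheses_string_alt (seq : String) : List Int :=
  (PySem.List.enumerate (seq.toList.filter pvIsBracket) 0).map
    (fun p => PySem.Int.mod (p.1 + (if p.2 = ')' then 1 else 0)) 2)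

-- ===== PRECONDITION & SPEC =====
-- Pre_ excludes exactly the inputs on which A raises IndexError: those with a prefix
-- containing more ')' than '(' (pop from the empty stack).
def Pre_maximum_nesting_depth_of_two_valid_parentheses_string (seq : String) : Prop :=
  ∀ n < seq.toList.length + 1,
    (seq.toList.take n).count ')' ≤ (seq.toList.take n).count '('
instance (seq : String) : Decidable (Pre_maximum_nesting_depth_of_two_valid_parentheses_string seq) := by
  unfold Pre_maximum_nesting_depth_of_two_valid_parentheses_string; infer_instance

def pvWitness_maximum_nesting_depth_of_two_valid_parentheses_string : String := "(()(a))("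

def Spec_maximum_nesting_depth_of_two_valid_parentheses_string (seq : String) (out : List Int) : Prop := out = maximum_nesting_depth_of_two_valid_parentheses_string_alt seq
instance (seq : String) (out : List Int) : Decidable (Spec_maximum_nesting_depth_of_two_valid_parentheses_string seq out) := by unfold Spec_maximum_nesting_depth_of_two_valid_parentheses_string; infer_instance

-- ===== CLAIM (what is proved, stated in full; the proofs are below) =====
def Claim_equal_maximum_nesting_depth_of_two_valid_parentheses_string : Prop := ∀ (seq : String), Dom_maximum_nesting_depth_of_two_valid_parentheses_string seq → Pre_maximum_nesting_depth_of_two_valid_parentheses_string seq → Spec_maximum_nesting_depth_of_two_valid_parentheses_string seq (maximum_nesting_depth_of_two_valid_parentheses_string seq)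

-- ===== LEMMAS AND PROOFS =====

-- the bit sequence B computes, as a recursion over the characters with bracket index j
def pvBits : List Char → Int → List Int
  | [], _ => []
  | c :: rest, j =>
    if c = '(' then PySem.Int.mod j 2 :: pvBits rest (j + 1)
    else if c = ')' then PySem.Int.mod (j + 1) 2 :: pvBits rest (j + 1)
    else pvBits rest j

lemma pvBits_eq_alt (cs : List Char) : ∀ (j : Int),
    (PySem.List.enumerate (cs.filter pvIsBracket) j).map
      (fun p => PySem.Int.mod (p.1 + (if p.2 = ')' then 1 else 0)) 2) = pvBits cs j := by
  induction cs with
  | nil => intro j; simp [pvBits]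
  | cons c rest ih =>
    intro j
    by_cases hc : c = '('
    · subst hc
      have hf : List.filter pvIsBracket ('(' :: rest) = '(' :: List.filter pvIsBracket rest := by
        simp [pvIsBracket]
      rw [hf, PySem.List.enumerate_cons, List.map_cons, ih (j + 1)]
      simp [pvBits]
    · by_cases hc2 : c = ')'
      · subst hc2
        have hf : List.filter pvIsBracket (')' :: rest) = ')' :: List.filter pvIsBracket rest := by
          simp [pvIsBracket]
        rw [hf, PySem.List.enumerate_cons, List.map_cons, ih (j + 1)]
        simp [pvBits]
      · have hf : List.filter pvIsBracket (c :: rest) = List.filter pvIsBracket rest := by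
          simp [pvIsBracket, hc, hc2]
        rw [hf, ih j]
        simp [pvBits, hc, hc2]

-- A's stack at depth d is fully determined: the label at depth k is "A" iff k is even.
def pvLabelOf (d : Nat) : String := if d % 2 = 0 then "A" else "B"
def pvStackOf : Nat → List String
  | 0 => []
  | n + 1 => pvLabelOf n :: pvStackOf n

lemma pvGoA_eq_pvBits (cs : List Char) :
    ∀ (d : Nat) (j : Int) (q : List Int),
      0 ≤ j →
      (d : Int) % 2 = j % 2 →
      (∀ n, (cs.take n).count ')' ≤ d + (cs.take n).count '(') →
      pvGoA cs (pvStackOf d) q = q ++ pvBits cs j := by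
  induction cs with
  | nil => intro d j q _ _ _; simp [pvGoA, pvBits]
  | cons c rest ih =>
    intro d j q hj hpar h
    by_cases hc : c = '('
    · subst hc
      have hrest : ∀ n, (rest.take n).count ')' ≤ (d + 1) + (rest.take n).count '(' := by
        intro n
        have hh := h (n + 1)
        simp [List.take_succ_cons] at hh
        omega
      have hm : PySem.Int.mod j 2 = (d : Int) % 2 := by
        rw [PySem.Int.mod_eq_emod_of_pos (by norm_num)]; omega
      have hpar' : ((d + 1 : Nat) : Int) % 2 = (j + 1) % 2 := by push_cast; omega
      have htail := ih (d + 1) (j + 1) (q ++ [PySem.Int.mod j 2]) (by omega) hpar' hrest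
      have hbits : pvBits ('(' :: rest) j = PySem.Int.mod j 2 :: pvBits rest (j + 1) := by
        simp [pvBits]
      cases d with
      | zero =>
        have hstep : pvGoA ('(' :: rest) (pvStackOf 0) q
            = pvGoA rest (pvStackOf 1) (q ++ [0]) := by
          simp [pvGoA, pvStackOf, pvLabelOf]
        have h0 : PySem.Int.mod j 2 = 0 := by rw [hm]; norm_num
        rw [hstep, hbits]
        rw [show (q ++ [(0 : Int)]) = q ++ [PySem.Int.mod j 2] by rw [h0]] at *
        rw [htail]; simp
      | succ k =>
        rcases Nat.even_or_odd k with hk | hk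
        · -- label at top is "A": push "B", emit 1; d = k+1 odd
          have hk2 : k % 2 = 0 := Nat.even_iff.mp hk
          have hstep : pvGoA ('(' :: rest) (pvStackOf (k + 1)) q
              = pvGoA rest (pvStackOf (k + 2)) (q ++ [1]) := by
            simp [pvGoA, pvStackOf, pvLabelOf, hk2, Nat.succ_mod_two_eq_one_iff.mpr hk2]
          have h1 : PySem.Int.mod j 2 = 1 := by rw [hm]; push_cast; omega
          rw [hstep, hbits]
          rw [show (q ++ [(1 : Int)]) = q ++ [PySem.Int.mod j 2] by rw [h1]]
          rw [htail]; simp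
        · -- label at top is "B": push "A", emit 0; d = k+1 even
          have hk2 : k % 2 = 1 := Nat.odd_iff.mp hk
          have hstep : pvGoA ('(' :: rest) (pvStackOf (k + 1)) q
              = pvGoA rest (pvLabelOf (k + 1) :: pvStackOf (k + 1)) (q ++ [0]) := by
            simp [pvGoA, pvStackOf, pvLabelOf, hk2, Nat.succ_mod_two_eq_zero_iff.mpr hk2]
          rw [show pvLabelOf (k + 1) :: pvStackOf (k + 1) = pvStackOf (k + 2) from rfl] at hstep
          have h0 : PySem.Int.mod j 2 = 0 := by rw [hm]; push_cast; omega
          rw [hstep, hbits]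
          rw [show (q ++ [(0 : Int)]) = q ++ [PySem.Int.mod j 2] by rw [h0]]
          rw [htail]; simp
    · by_cases hc2 : c = ')'
      · subst hc2
        have hd : 1 ≤ d := by
          have hh := h 1
          simp [List.take_succ_cons] at hh
          omega
        obtain ⟨k, rfl⟩ : ∃ k, d = k + 1 := ⟨d - 1, by omega⟩
        have hrest : ∀ n, (rest.take n).count ')' ≤ k + (rest.take n).count '(' := by
          intro n
          have hh := h (n + 1)
          simp [List.take_succ_cons] at hh
          omega
        have hpar' : ((k : Nat) : Int) % 2 = (j + 1) % 2 := by push_cast at hpar ⊢; omega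
        have hm : PySem.Int.mod (j + 1) 2 = ((k : Nat) : Int) % 2 := by
          rw [PySem.Int.mod_eq_emod_of_pos (by norm_num)]; omega
        have hbits : pvBits (')' :: rest) j = PySem.Int.mod (j + 1) 2 :: pvBits rest (j + 1) := by
          simp [pvBits]
        have htail := ih k (j + 1) (q ++ [PySem.Int.mod (j + 1) 2]) (by omega) hpar' hrest
        rcases Nat.even_or_odd k with hk | hk
        · have hk2 : k % 2 = 0 := Nat.even_iff.mp hk
          have hstep : pvGoA (')' :: rest) (pvStackOf (k + 1)) q
              = pvGoA rest (pvStackOf k) (q ++ [0]) := by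
            simp [pvGoA, pvStackOf, pvLabelOf, hk2]
          have h0 : PySem.Int.mod (j + 1) 2 = 0 := by rw [hm]; omega
          rw [hstep, hbits]
          rw [show (q ++ [(0 : Int)]) = q ++ [PySem.Int.mod (j + 1) 2] by rw [h0]]
          rw [htail]; simp
        · have hk2 : k % 2 = 1 := Nat.odd_iff.mp hk
          have hstep : pvGoA (')' :: rest) (pvStackOf (k + 1)) q
              = pvGoA rest (pvStackOf k) (q ++ [1]) := by
            simp [pvGoA, pvStackOf, pvLabelOf, hk2]
          have h1 : PySem.Int.mod (j + 1) 2 = 1 := by rw [hm]; omega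
          rw [hstep, hbits]
          rw [show (q ++ [(1 : Int)]) = q ++ [PySem.Int.mod (j + 1) 2] by rw [h1]]
          rw [htail]; simp
      · have hstep : pvGoA (c :: rest) (pvStackOf d) q = pvGoA rest (pvStackOf d) q := by
          cases d with
          | zero => simp [pvGoA, pvStackOf, hc, hc2]
          | succ k => simp [pvGoA, pvStackOf, hc, hc2]
        have hrest : ∀ n, (rest.take n).count ')' ≤ d + (rest.take n).count '(' := by
          intro n
          have hh := h (n + 1)
          simp [List.take_succ_cons, hc, hc2] at hh
          omega
        rw [hstep, ih d j q hj hpar hrest]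
        simp [pvBits, hc, hc2]

-- ===== VERDICT (by name: the statement is the Claim_ definition above) =====
theorem maximum_nesting_depth_of_two_valid_parentheses_string_spec : Claim_equal_maximum_nesting_depth_of_two_valid_parentheses_string := by
  intro seq _ hpre
  unfold Spec_maximum_nesting_depth_of_two_valid_parentheses_string
  unfold maximum_nesting_depth_of_two_valid_parentheses_string
  unfold maximum_nesting_depth_of_two_valid_parentheses_string_alt
  have h : ∀ n, (seq.toList.take n).count ')' ≤ 0 + (seq.toList.take n).count '(' := by
    intro n
    by_cases hn : n ≤ seq.toList.length
    · have := hpre n (by omega)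
      omega
    · have : seq.toList.take n = seq.toList.take seq.toList.length := by
        rw [List.take_of_length_le (by omega), List.take_length]
      rw [this]
      have := hpre seq.toList.length (by omega)
      omega
  have hA := pvGoA_eq_pvBits seq.toList 0 0 [] (by omega) (by norm_num) h
  have hB := pvBits_eq_alt seq.toList 0
  rw [hB]
  simpa [pvStackOf] using hA
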